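-- pv_equiv track=rewrite | github.com/l-yohai/LostCow | 색종이 만들기/hakyeom.py | split_paper
-- ===== SOURCE A (Python) =====
-- def split_paper(paper):
--     half_len = len(paper) // 2
--     upper_paper = paper[:half_len]
--     bottom_paper = paper[half_len:]
--
--     uppper_left = [upper[:half_len] for upper in upper_paper]
--     uppper_right = [upper[half_len:] for upper in upper_paper]
--     bottom_left = [bottom[:half_len] for bottom in bottom_paper]
--     bottom_right = [bottom[half_len:] for bottom in bottom_paper]
--
--     return [uppper_left, uppper_right, bottom_left, bottom_right]
-- ===== SOURCE B (Python) =====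
-- def split_paper(paper):
--     half = len(paper) // 2
--     out = [[], [], [], []]
--     for r, row in enumerate(paper):
--         left, right = [], []
--         for c, v in enumerate(row):
--             (left if c < half else right).append(v)
--         top = r < half
--         out[0 if top else 2].append(left)
--         out[1 if top else 3].append(right)
--     return out
-- ===== Notes on version B (the rewrite author's own statement) =====
-- stated objective: alternative
-- what changed: A cuts the grid with list slices (row split plus four slice comprehensions); B never slices: it classifies every individual cell by comparing its (row, column) coordinates with half and appends it to the matching quadrant bucket in a nested cell-level pass.
import Mathlib
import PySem

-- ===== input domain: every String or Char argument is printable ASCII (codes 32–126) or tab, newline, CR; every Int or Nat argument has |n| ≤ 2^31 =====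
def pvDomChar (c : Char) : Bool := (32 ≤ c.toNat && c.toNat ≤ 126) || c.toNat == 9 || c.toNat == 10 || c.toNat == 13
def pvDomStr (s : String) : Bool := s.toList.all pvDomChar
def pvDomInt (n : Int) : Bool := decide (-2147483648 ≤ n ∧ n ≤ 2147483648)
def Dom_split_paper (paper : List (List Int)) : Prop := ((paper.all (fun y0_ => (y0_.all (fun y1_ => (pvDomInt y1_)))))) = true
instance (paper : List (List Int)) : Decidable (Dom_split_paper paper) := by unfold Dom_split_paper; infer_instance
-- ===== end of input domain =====

-- ===== PORT A =====
-- A, literally: half = len//2; split rows, then four slice comprehensions.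
def split_paper (paper : List (List Int)) : List (List (List Int)) :=
  let half_len := paper.length / 2
  let upper_paper := paper.take half_len
  let bottom_paper := paper.drop half_len
  let upper_left := upper_paper.map (fun upper => upper.take half_len)
  let upper_right := upper_paper.map (fun upper => upper.drop half_len)
  let bottom_left := bottom_paper.map (fun bottom => bottom.take half_len)
  let bottom_right := bottom_paper.map (fun bottom => bottom.drop half_len)
  [upper_left, upper_right, bottom_left, bottom_right]

-- ===== PORT B =====
-- B: no slicing; every cell is classified by its (row, column) coordinates vs half.
-- inner loop of Source B: distribute the cells of one row into left/right by c < half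
def cellLoop (half : Nat) (cells : List (Int × Int)) (left right : List Int) :
    List Int × List Int :=
  match cells with
  | [] => (left, right)
  | (c, v) :: rest =>
    if c < (half : Int) then cellLoop half rest (left ++ [v]) right
    else cellLoop half rest left (right ++ [v])

-- outer loop of Source B over enumerate(paper), four quadrant buckets
def rowLoop (half : Nat) (rows : List (Int × List Int))
    (ul ur bl br : List (List Int)) : List (List (List Int)) :=
  match rows with
  | [] => [ul, ur, bl, br]
  | (r, row) :: rest =>
    let lr := cellLoop half (PySem.List.enumerate row 0) [] []
    if r < (half : Int) then
      rowLoop half rest (ul ++ [lr.1]) (ur ++ [lr.2]) bl br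
    else
      rowLoop half rest ul ur (bl ++ [lr.1]) (br ++ [lr.2])

def split_paper_alt (paper : List (List Int)) : List (List (List Int)) :=
  let half := paper.length / 2
  rowLoop half (PySem.List.enumerate paper 0) [] [] [] []

-- ===== PRECONDITION & SPEC =====
def Spec_split_paper (paper : List (List Int)) (out : List (List (List Int))) : Prop := out = split_paper_alt paper
instance (paper : List (List Int)) (out : List (List (List Int))) : Decidable (Spec_split_paper paper out) := by unfold Spec_split_paper; infer_instance

-- ===== CLAIM (what is proved, stated in full; the proofs are below) =====
def Claim_equal_split_paper : Prop := ∀ (paper : List (List Int)), Dom_split_paper paper → Spec_split_paper paper (split_paper paper)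

-- ===== LEMMAS AND PROOFS =====
-- once the column index is ≥ half, every remaining cell goes right
theorem cellLoop_down (half : Nat) (xs : List Int) (s : Int)
    (hs : (half : Int) ≤ s) (left right : List Int) :
    cellLoop half (PySem.List.enumerate xs s) left right = (left, right ++ xs) := by
  induction xs generalizing s right with
  | nil => simp [PySem.List.enumerate_nil, cellLoop]
  | cons x rest ih =>
    rw [PySem.List.enumerate_cons, cellLoop]
    simp only [if_neg (by omega : ¬ s < (half : Int))]
    rw [ih (s + 1) (by omega)]
    simp

-- invariant: starting at column s ≤ half, the first half - s cells go left
theorem cellLoop_inv (half : Nat) (xs : List Int) (s : Nat)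
    (hs : s ≤ half) (left right : List Int) :
    cellLoop half (PySem.List.enumerate xs (s : Int)) left right =
      (left ++ xs.take (half - s), right ++ xs.drop (half - s)) := by
  induction xs generalizing s left right with
  | nil => simp [PySem.List.enumerate_nil, cellLoop]
  | cons x rest ih =>
    rw [PySem.List.enumerate_cons, cellLoop]
    by_cases h : s < half
    · simp only [if_pos (by exact_mod_cast h : (s : Int) < (half : Int))]
      have : ((s : Int) + 1) = ((s + 1 : Nat) : Int) := by push_cast; ring
      rw [this, ih (s + 1) (by omega)]
      have ht : half - s = (half - (s + 1)) + 1 := by omega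
      simp [ht]
    · have hse : s = half := by omega
      simp only [if_neg (by omega : ¬ (s : Int) < (half : Int))]
      rw [cellLoop_down half rest ((s : Int) + 1) (by omega)]
      have ht : half - s = 0 := by omega
      simp [ht]

-- one row's cell pass produces exactly the two slice halves
theorem cellLoop_eq (half : Nat) (xs : List Int) :
    cellLoop half (PySem.List.enumerate xs 0) [] [] = (xs.take half, xs.drop half) := by
  have h0 : ((0 : Nat) : Int) = (0 : Int) := rfl
  rw [← h0, cellLoop_inv half xs 0 (by omega)]
  simp

-- once the row index is ≥ half, all rows go to the bottom buckets
theorem rowLoop_down (half : Nat) (rows : List (List Int)) (s : Int)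
    (hs : (half : Int) ≤ s) (ul ur bl br : List (List Int)) :
    rowLoop half (PySem.List.enumerate rows s) ul ur bl br =
      [ul, ur, bl ++ rows.map (fun r => r.take half),
        br ++ rows.map (fun r => r.drop half)] := by
  induction rows generalizing s bl br with
  | nil => simp [PySem.List.enumerate_nil, rowLoop]
  | cons r rs ih =>
    rw [PySem.List.enumerate_cons, rowLoop]
    simp only [cellLoop_eq, if_neg (by omega : ¬ s < (half : Int))]
    rw [ih (s + 1) (by omega)]
    simp

-- invariant: starting at row index s ≤ half, the first half - s rows go up
theorem rowLoop_inv (half : Nat) (rows : List (List Int)) (s : Nat)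
    (hs : s ≤ half) (ul ur bl br : List (List Int)) :
    rowLoop half (PySem.List.enumerate rows (s : Int)) ul ur bl br =
      [ul ++ (rows.take (half - s)).map (fun r => r.take half),
        ur ++ (rows.take (half - s)).map (fun r => r.drop half),
        bl ++ (rows.drop (half - s)).map (fun r => r.take half),
        br ++ (rows.drop (half - s)).map (fun r => r.drop half)] := by
  induction rows generalizing s ul ur bl br with
  | nil => simp [PySem.List.enumerate_nil, rowLoop]
  | cons r rs ih =>
    rw [PySem.List.enumerate_cons, rowLoop]
    simp only [cellLoop_eq]
    by_cases h : s < half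
    · simp only [if_pos (by exact_mod_cast h : (s : Int) < (half : Int))]
      have : ((s : Int) + 1) = ((s + 1 : Nat) : Int) := by push_cast; ring
      rw [this, ih (s + 1) (by omega)]
      have ht : half - s = (half - (s + 1)) + 1 := by omega
      simp [ht]
    · have hse : s = half := by omega
      simp only [if_neg (by omega : ¬ (s : Int) < (half : Int))]
      rw [rowLoop_down half rs ((s : Int) + 1) (by omega)]
      have ht : half - s = 0 := by omega
      simp [ht]

-- ===== VERDICT (by name: the statement is the Claim_ definition above) =====
theorem split_paper_spec : Claim_equal_split_paper := by
  intro paper _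
  unfold Spec_split_paper split_paper split_paper_alt
  have h0 : ((0 : Nat) : Int) = (0 : Int) := rfl
  rw [← h0, rowLoop_inv (paper.length / 2) paper 0 (by omega)]
  simp
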